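-- pv_equiv track=rewrite | github.com/AndreOliveiraMendes/streamlit_test | pages/utils/system_util.py | generate_extended_matrix
-- ===== SOURCE A (Python) =====
-- from itertools import combinations
--
-- def generate_extended_matrix(num_stats: int) -> list[list[str]]:
--     """
--     gera a matrix estendida do sistema de equações decorente do problem "n-{1,2}"
--
--     Parâmetros:
--
--     - num_stats (int): o numero de atributos do sistema
--
--     Retorna:
--
--     - list[list[str]]: uma matrix de n linhas e n + n*(n-1)/2 + 1 colunas que representa simbolicamente a matrix extendida
--     """
--     matrix = []
--     num_mixed = num_stats * (num_stats - 1)//2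
--     for i in range(1, num_stats + 1):
--         row = []
--         mixed_index = combinations(range(1, num_stats + 1), 2)
--         for j, combo in zip(range(1, num_mixed + 1), mixed_index):
--             j, k = combo
--             if i == j or i == k:
--                 row.append("m")
--             else:
--                 row.append("0")
--         for j in range(1, num_stats + 1):
--             if i == j:
--                 row.append("p")
--             else:
--                 row.append("0")
--         row.append("s" + str(i))
--         matrix.append(row)
--     return matrix
-- ===== SOURCE B (Python) =====
-- from itertools import combinations
--
-- def generate_extended_matrix(num_stats: int) -> list[list[str]]:
--     n = num_stats
--     num_mixed = n * (n - 1) // 2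
--     matrix = [["0"] * num_mixed for _ in range(n)]
--     for c, combo in enumerate(combinations(range(1, n + 1), 2)):
--         j, k = combo
--         matrix[j - 1][c] = "m"
--         matrix[k - 1][c] = "m"
--     return [row + ["p" if i == j else "0" for j in range(1, n + 1)] + ["s" + str(i)]
--             for i, row in enumerate(matrix, start=1)]
-- ===== Notes on version B (the rewrite author's own statement) =====
-- stated objective: alternative
-- what changed: Instead of regenerating the combinations iterator for every row and testing every (row, pair) cell, B allocates all rows as '0'-filled lists once and makes a single scatter pass over the pairs, writing 'm' into the two affected rows per column, then appends the diagonal block and the 's'+str(i) tail per row.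
import Mathlib
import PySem

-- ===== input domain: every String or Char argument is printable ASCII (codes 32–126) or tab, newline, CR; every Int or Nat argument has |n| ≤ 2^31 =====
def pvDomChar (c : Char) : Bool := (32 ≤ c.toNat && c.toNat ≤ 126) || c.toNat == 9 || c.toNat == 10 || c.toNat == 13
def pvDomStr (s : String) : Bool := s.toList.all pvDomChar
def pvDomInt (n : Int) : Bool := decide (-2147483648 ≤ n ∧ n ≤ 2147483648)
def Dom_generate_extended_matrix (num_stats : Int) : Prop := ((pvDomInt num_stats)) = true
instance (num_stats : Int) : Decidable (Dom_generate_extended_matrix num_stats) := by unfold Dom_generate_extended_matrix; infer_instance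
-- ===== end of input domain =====

-- B replaces A's per-row scan of all index pairs by one '0'-filled allocation plus a single
-- scatter pass over the pairs; the return values are proved equal for every input.

-- ===== PORT A =====
def generate_extended_matrix (num_stats : Int) : List (List String) :=
  let num_mixed := PySem.Int.floordiv (num_stats * (num_stats - 1)) 2
  (PySem.List.pyRange 1 (num_stats + 1) 1).foldl (fun matrix i =>
    let mixed_index := PySem.List.combinations (PySem.List.pyRange 1 (num_stats + 1) 1) 2
    let row : List String :=
      (List.zip (PySem.List.pyRange 1 (num_mixed + 1) 1) mixed_index).foldl
        (fun row x =>
          -- j, k = combo : every combo has length 2, so getD is exact here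
          let j := x.2.getD 0 0
          let k := x.2.getD 1 0
          if i = j ∨ i = k then row ++ ["m"] else row ++ ["0"]) []
    let row := (PySem.List.pyRange 1 (num_stats + 1) 1).foldl
      (fun row j => if i = j then row ++ ["p"] else row ++ ["0"]) row
    let row := row ++ ["s" ++ PySem.Int.toStr i]
    matrix ++ [row]) []

-- ===== PORT B =====
def generate_extended_matrix_alt (num_stats : Int) : List (List String) :=
  let n := num_stats
  let num_mixed := PySem.Int.floordiv (n * (n - 1)) 2
  let matrix := (PySem.List.pyRange 0 n 1).map (fun _ => PySem.List.pyRepeat ["0"] num_mixed)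
  let matrix :=
    (PySem.List.enumerate (PySem.List.combinations (PySem.List.pyRange 1 (n + 1) 1) 2) 0).foldl
      (fun M x =>
        -- j, k = combo : every combo has length 2, so getD is exact here
        let j := x.2.getD 0 0
        let k := x.2.getD 1 0
        -- matrix[j-1][x.1] = "m"; matrix[k-1][x.1] = "m" — indices are always in range
        let M := PySem.List.pySetD M (j - 1) (PySem.List.pySetD (PySem.List.pyGetD M (j - 1) []) x.1 "m")
        PySem.List.pySetD M (k - 1) (PySem.List.pySetD (PySem.List.pyGetD M (k - 1) []) x.1 "m"))
      matrix
  (PySem.List.enumerate matrix 1).map (fun x =>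
    x.2 ++ ((PySem.List.pyRange 1 (n + 1) 1).map (fun j => if x.1 = j then "p" else "0")
        ++ ["s" ++ PySem.Int.toStr x.1]))

-- ===== PRECONDITION & SPEC =====
def Spec_generate_extended_matrix (num_stats : Int) (out : List (List String)) : Prop := out = generate_extended_matrix_alt num_stats
instance (num_stats : Int) (out : List (List String)) : Decidable (Spec_generate_extended_matrix num_stats out) := by unfold Spec_generate_extended_matrix; infer_instance

-- ===== CLAIM (what is proved, stated in full; the proofs are below) =====
def Claim_equal_generate_extended_matrix : Prop := ∀ (num_stats : Int), Dom_generate_extended_matrix num_stats → Spec_generate_extended_matrix num_stats (generate_extended_matrix num_stats)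

-- ===== LEMMAS AND PROOFS =====

-- the cell value of the mixed block: "m" iff row index i occurs in the pair c = [j,k]
def pvMixf (i : Int) (c : List Int) : String := if i = c.getD 0 0 ∨ i = c.getD 1 0 then "m" else "0"

-- the common row shape both programs produce (row index r : Nat, Python's i = r+1)
def pvRow (n : Int) (r : Nat) : List String :=
  (PySem.List.combinations (PySem.List.pyRange 1 (n + 1) 1) 2).map (pvMixf ((r : Int) + 1)) ++
    ((PySem.List.pyRange 1 (n + 1) 1).map (fun j => if ((r : Int) + 1) = j then "p" else "0") ++
      ["s" ++ PySem.Int.toStr ((r : Int) + 1)])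

-- every element of combinations(range(1,n+1), 2) is a pair [j,k] with 1 ≤ j < k ≤ n
lemma pv_combo_mem (n : Int) (c : List Int)
    (hc : c ∈ PySem.List.combinations (PySem.List.pyRange 1 (n + 1) 1) 2) :
    ∃ j k : Int, c = [j, k] ∧ 1 ≤ j ∧ 1 ≤ k ∧ j ≤ n ∧ k ≤ n ∧ j ≠ k := by
  rw [PySem.List.mem_combinations_iff] at hc
  obtain ⟨hsub, hlen⟩ := hc
  match c, hlen with
  | [j, k], _ =>
    have hpw : List.Pairwise (· < ·) [j, k] :=
      (PySem.List.pairwise_lt_pyRange_one 1 (n + 1)).sublist hsub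
    have hjk : j < k := by simpa using hpw
    have hj : j ∈ PySem.List.pyRange 1 (n + 1) 1 := hsub.subset (by simp)
    have hk : k ∈ PySem.List.pyRange 1 (n + 1) 1 := hsub.subset (by simp)
    rw [PySem.List.mem_pyRange_one] at hj hk
    exact ⟨j, k, rfl, by omega, by omega, by omega, by omega, by omega⟩

-- |combinations xs 2| * 2 = |xs| * (|xs| - 1)
lemma pv_combos_len {α : Type} (xs : List α) :
    (PySem.List.combinations xs 2).length * 2 = xs.length * (xs.length - 1) := by
  induction xs with
  | nil => simp [PySem.List.combinations_nil_succ]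
  | cons x xs ih =>
    rw [PySem.List.combinations_cons_succ]
    simp only [List.length_append, List.length_map, PySem.List.combinations_one, List.length_cons]
    rw [Nat.add_mul, ih]
    cases xs with
    | nil => simp
    | cons y ys => simp; ring

-- num_mixed computes the number of pairs
lemma pv_num_mixed (n : Int) (hn : 1 ≤ n) :
    PySem.Int.floordiv (n * (n - 1)) 2
      = ((PySem.List.combinations (PySem.List.pyRange 1 (n + 1) 1) 2).length : Int) := by
  have h2 := pv_combos_len (PySem.List.pyRange 1 (n + 1) 1)
  rw [PySem.List.length_pyRange_one] at h2
  have hL : ((n + 1 - 1).toNat : Int) = n := by omega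
  have hcast : n * (n - 1)
      = ((PySem.List.combinations (PySem.List.pyRange 1 (n + 1) 1) 2).length * 2 : Nat) := by
    rw [h2]
    have h1 : (((n + 1 - 1).toNat * ((n + 1 - 1).toNat - 1) : Nat) : Int)
        = ((n + 1 - 1).toNat : Int) * (((n + 1 - 1).toNat : Int) - 1) := by
      push_cast [Nat.cast_sub (by omega : 1 ≤ (n + 1 - 1).toNat)]
      ring
    rw [h1, hL]
  rw [PySem.Int.floordiv_eq_ediv_of_pos (by norm_num), hcast]
  omega

-- a map over range(1, n+1) is a map over the row indices 0..n-1 with i = r+1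
lemma pv_map_pyRange_one {α : Type} (f : Int → α) (n : Int) :
    (PySem.List.pyRange 1 (n + 1) 1).map f
      = (List.range n.toNat).map (fun r : Nat => f ((r : Int) + 1)) := by
  rw [PySem.List.pyRange_one, List.map_map]
  have hn1 : n + 1 - 1 = n := by ring
  rw [hn1]
  apply List.map_congr_left
  intro r _
  simp only [Function.comp]
  exact congrArg f (by ring)

lemma pv_enumerate_map_range {α : Type} (g : Nat → α) (N : Nat) (s : Int) :
    PySem.List.enumerate ((List.range N).map g) s
      = (List.range N).map (fun r : Nat => (s + (r : Int), g r)) := by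
  induction N with
  | zero => simp [PySem.List.enumerate_nil]
  | succ N ih =>
      simp [List.range_succ, PySem.List.enumerate_append, ih, PySem.List.enumerate_cons,
        PySem.List.enumerate_nil]

lemma pv_set_map_range {α : Type} (g : Nat → α) (N r : Nat) (v : α) :
    ((List.range N).map g).set r v
      = (List.range N).map (fun r' => if r' = r then v else g r') := by
  apply List.ext_getElem
  · simp
  · intro i h1 h2
    simp only [List.getElem_set, List.getElem_map, List.getElem_range]
    by_cases hi : i = r <;> simp [hi, Ne.symm]

-- the scatter loop of B turns the '0'-filled rows into the mixed block, column by column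
lemma pv_scatter (n : Int) (N : Nat) (hn : (N : Int) = n) (done todo : List (List Int))
    (hmem : ∀ c ∈ todo, ∃ j k : Int, c = [j, k] ∧ 1 ≤ j ∧ 1 ≤ k ∧ j ≤ n ∧ k ≤ n ∧ j ≠ k) :
    (PySem.List.enumerate todo (done.length : Int)).foldl
      (fun M x =>
        let j := x.2.getD 0 0
        let k := x.2.getD 1 0
        let M := PySem.List.pySetD M (j - 1) (PySem.List.pySetD (PySem.List.pyGetD M (j - 1) []) x.1 "m")
        PySem.List.pySetD M (k - 1) (PySem.List.pySetD (PySem.List.pyGetD M (k - 1) []) x.1 "m"))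
      ((List.range N).map (fun r : Nat => done.map (pvMixf ((r : Int) + 1)) ++ List.replicate todo.length "0"))
    = (List.range N).map (fun r : Nat => (done ++ todo).map (pvMixf ((r : Int) + 1))) := by
  induction todo generalizing done with
  | nil => simp [PySem.List.enumerate_nil]
  | cons c rest ih =>
    obtain ⟨j, k, hc, hj1, hk1, hjn, hkn, hjk⟩ := hmem c (by simp)
    subst hc
    rw [PySem.List.enumerate_cons, List.foldl_cons]
    have hjN : (j - 1).toNat < N := by omega
    have hkN : (k - 1).toNat < N := by omega
    set g := fun r : Nat => done.map (pvMixf ((r : Int) + 1)) ++ List.replicate ([j,k] :: rest).length "0" with hg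
    -- the row read back for an in-range 1-based index m
    have hget : ∀ (M : List (List String)) (gg : Nat → List String) (m : Int), M = (List.range N).map gg → 1 ≤ m → m ≤ n →
        PySem.List.pyGetD M (m - 1) [] = gg (m - 1).toNat := by
      intro M gg m hM hm1 hmn
      subst hM
      rw [PySem.List.pyGetD_eq_getElem _ _ (by omega) (by simp; omega)]
      simp
    -- setting cell done.length of a row of the old shape gives a row of the new shape
    have hrow : ∀ m : Int, m = j ∨ m = k →
        PySem.List.pySetD (g (m - 1).toNat) (done.length : Int) "m"
          = (done ++ [[j, k]]).map (pvMixf ((((m - 1).toNat : Nat) : Int) + 1)) ++ List.replicate rest.length "0" := by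
      intro m hm
      have hm1 : 1 ≤ m := by rcases hm with rfl | rfl <;> omega
      have hmi : (((m - 1).toNat : Nat) : Int) + 1 = m := by omega
      rw [PySem.List.pySetD_of_nonneg _ _ (by positivity)]
      simp only [hg, hmi, List.length_cons, List.replicate_succ, Int.toNat_natCast]
      have : done.length = (done.map (pvMixf m)).length := by simp
      rw [this, List.set_append_right _ _ (le_refl _)]
      simp only [Nat.sub_self, List.set_cons_zero, List.map_append, List.map_cons, List.map_nil,
        List.append_assoc, List.cons_append, List.nil_append]
      congr 1
      simp only [pvMixf, List.getD]
      rcases hm with rfl | rfl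
      · simp
      · simp
    have hM1 : PySem.List.pySetD ((List.range N).map g) (j - 1)
        (PySem.List.pySetD (PySem.List.pyGetD ((List.range N).map g) (j - 1) []) (done.length : Int) "m")
        = (List.range N).map (fun r' : Nat => if r' = (j - 1).toNat then
            (done ++ [[j, k]]).map (pvMixf ((((j - 1).toNat : Nat) : Int) + 1)) ++ List.replicate rest.length "0"
          else g r') := by
      rw [hget _ g j rfl hj1 hjn, hrow j (Or.inl rfl), PySem.List.pySetD_of_nonneg _ _ (by omega),
        pv_set_map_range]
    set g1 := fun r' : Nat => if r' = (j - 1).toNat then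
        (done ++ [[j, k]]).map (pvMixf ((((j - 1).toNat : Nat) : Int) + 1)) ++ List.replicate rest.length "0"
      else g r' with hg1
    have hstep :
        PySem.List.pySetD
          (PySem.List.pySetD ((List.range N).map g) (j - 1)
            (PySem.List.pySetD (PySem.List.pyGetD ((List.range N).map g) (j - 1) []) (done.length : Int) "m"))
          (k - 1)
          (PySem.List.pySetD
            (PySem.List.pyGetD
              (PySem.List.pySetD ((List.range N).map g) (j - 1)
                (PySem.List.pySetD (PySem.List.pyGetD ((List.range N).map g) (j - 1) []) (done.length : Int) "m"))
              (k - 1) []) (done.length : Int) "m")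
        = (List.range N).map
            (fun r : Nat => (done ++ [[j, k]]).map (pvMixf ((r : Int) + 1)) ++ List.replicate rest.length "0") := by
      rw [hM1]
      rw [hget _ g1 k rfl hk1 hkn]
      have hgk : g1 (k - 1).toNat = g (k - 1).toNat := by
        simp only [hg1, if_neg (by omega : ¬ (k - 1).toNat = (j - 1).toNat)]
      rw [hgk, hrow k (Or.inr rfl)]
      rw [PySem.List.pySetD_of_nonneg _ _ (by omega)]
      rw [pv_set_map_range]
      apply List.map_congr_left
      intro r hr
      rw [List.mem_range] at hr
      by_cases hrk : r = (k - 1).toNat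
      · subst hrk
        rw [if_pos rfl]
      · rw [if_neg hrk]
        by_cases hrj : r = (j - 1).toNat
        · subst hrj
          simp only [hg1, if_pos rfl]
        · rw [hg1]
          simp only [if_neg hrj]
          have h0 : pvMixf ((r : Int) + 1) [j, k] = "0" := by
            simp only [pvMixf, List.getD]
            rw [if_neg]
            push Not
            constructor <;> simp <;> omega
          simp only [hg, List.length_cons, List.replicate_succ, List.map_append, List.map_cons, List.map_nil]
          rw [h0]
          simp
    show List.foldl _ (PySem.List.pySetD
          (PySem.List.pySetD ((List.range N).map g) (j - 1)
            (PySem.List.pySetD (PySem.List.pyGetD ((List.range N).map g) (j - 1) []) (done.length : Int) "m"))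
          (k - 1)
          (PySem.List.pySetD
            (PySem.List.pyGetD
              (PySem.List.pySetD ((List.range N).map g) (j - 1)
                (PySem.List.pySetD (PySem.List.pyGetD ((List.range N).map g) (j - 1) []) (done.length : Int) "m"))
              (k - 1) []) (done.length : Int) "m"))
        (PySem.List.enumerate rest ((done.length : Int) + 1)) = _
    rw [hstep]
    have hlen : ((done.length : Int) + 1) = (((done ++ [[j,k]]).length : Nat) : Int) := by simp
    rw [hlen, ih (done ++ [[j,k]]) (fun c hc => hmem c (by simp [hc]))]
    simp

-- A's value is n rows of the common shape
lemma pv_A_eq (n : Int) (hn : 1 ≤ n) :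
    generate_extended_matrix n = (List.range n.toNat).map (pvRow n) := by
  unfold generate_extended_matrix
  simp only []
  -- outer loop: append-one-row fold is a map
  rw [PySem.List.foldl_append_singleton_eq_map
    (fun i => (PySem.List.pyRange 1 (n + 1) 1).foldl
        (fun row j => if i = j then row ++ ["p"] else row ++ ["0"])
        ((List.zip (PySem.List.pyRange 1 (PySem.Int.floordiv (n * (n - 1)) 2 + 1) 1)
          (PySem.List.combinations (PySem.List.pyRange 1 (n + 1) 1) 2)).foldl
          (fun row x => if i = x.2.getD 0 0 ∨ i = x.2.getD 1 0 then row ++ ["m"] else row ++ ["0"]) [])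
      ++ ["s" ++ PySem.Int.toStr i])]
  rw [List.nil_append, pv_map_pyRange_one]
  apply List.map_congr_left
  intro r hr
  rw [List.mem_range] at hr
  set i : Int := (r : Int) + 1 with hi
  set C := PySem.List.combinations (PySem.List.pyRange 1 (n + 1) 1) 2 with hC
  set R := PySem.List.pyRange 1 (PySem.Int.floordiv (n * (n - 1)) 2 + 1) 1 with hR
  have hlen : C.length ≤ R.length := by
    rw [hR, PySem.List.length_pyRange_one, pv_num_mixed n hn, ← hC]
    omega
  have h1 : (List.zip R C).foldl
      (fun row x => if i = x.2.getD 0 0 ∨ i = x.2.getD 1 0 then row ++ ["m"] else row ++ ["0"]) []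
      = C.map (pvMixf i) := by
    have hb : (fun (row : List String) (x : Int × List Int) =>
        if i = x.2.getD 0 0 ∨ i = x.2.getD 1 0 then row ++ ["m"] else row ++ ["0"])
        = fun row x => row ++ [pvMixf i x.2] := by
      funext row x
      simp only [pvMixf]
      split <;> rfl
    rw [hb, PySem.List.foldl_append_singleton_eq_map (fun x : Int × List Int => pvMixf i x.2), List.nil_append]
    rw [show (fun (x : Int × List Int) => pvMixf i x.2) = (pvMixf i) ∘ Prod.snd from rfl,
      ← List.map_map, List.map_snd_zip hlen]
  rw [h1]
  have h2 : (PySem.List.pyRange 1 (n + 1) 1).foldl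
      (fun row j => if i = j then row ++ ["p"] else row ++ ["0"]) (C.map (pvMixf i))
      = C.map (pvMixf i) ++ (PySem.List.pyRange 1 (n + 1) 1).map (fun j => if i = j then "p" else "0") := by
    have hb : (fun (row : List String) (j : Int) => if i = j then row ++ ["p"] else row ++ ["0"])
        = fun row j => row ++ [if i = j then "p" else "0"] := by
      funext row j
      split <;> rfl
    rw [hb, PySem.List.foldl_append_singleton_eq_map (fun j => if i = j then "p" else "0")]
  rw [h2, pvRow]
  simp only [List.append_assoc]
  rfl

-- B's value is the same n rows
lemma pv_B_eq (n : Int) (hn : 1 ≤ n) :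
    generate_extended_matrix_alt n = (List.range n.toNat).map (pvRow n) := by
  unfold generate_extended_matrix_alt
  simp only []
  set C := PySem.List.combinations (PySem.List.pyRange 1 (n + 1) 1) 2 with hC
  have hnum : (PySem.Int.floordiv (n * (n - 1)) 2).toNat = C.length := by
    rw [pv_num_mixed n hn, ← hC]
    omega
  have hM0 : (PySem.List.pyRange 0 n 1).map (fun _ => PySem.List.pyRepeat ["0"] (PySem.Int.floordiv (n * (n - 1)) 2))
      = (List.range n.toNat).map (fun _ : Nat => List.replicate C.length "0") := by
    rw [PySem.List.pyRange_one, List.map_map]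
    have h0 : n - 0 = n := by ring
    rw [h0]
    apply List.map_congr_left
    intro r _
    simp only [Function.comp, PySem.List.pyRepeat_singleton, hnum]
  rw [hM0]
  have hmem : ∀ c ∈ C, ∃ j k : Int, c = [j, k] ∧ 1 ≤ j ∧ 1 ≤ k ∧ j ≤ n ∧ k ≤ n ∧ j ≠ k :=
    fun c hc => pv_combo_mem n c hc
  have hsc := pv_scatter n n.toNat (by omega) [] C hmem
  simp only [List.length_nil, Nat.cast_zero, List.map_nil, List.nil_append] at hsc
  rw [hsc]
  rw [pv_enumerate_map_range]
  rw [List.map_map]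
  apply List.map_congr_left
  intro r hr
  simp only [Function.comp]
  have hcomm : (1 : Int) + (r : Int) = (r : Int) + 1 := by ring
  simp only [hcomm]
  rfl

lemma pv_main (n : Int) : generate_extended_matrix n = generate_extended_matrix_alt n := by
  by_cases hn : 1 ≤ n
  · rw [pv_A_eq n hn, pv_B_eq n hn]
  · have h1 : n + 1 ≤ 1 := by omega
    have h0 : n ≤ 0 := by omega
    simp [generate_extended_matrix, generate_extended_matrix_alt,
      PySem.List.pyRange_one_eq_nil h1, PySem.List.pyRange_one_eq_nil h0,
      PySem.List.combinations_nil_succ, PySem.List.enumerate_nil]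

-- ===== VERDICT (by name: the statement is the Claim_ definition above) =====
theorem generate_extended_matrix_spec : Claim_equal_generate_extended_matrix := by
  intro n _
  unfold Spec_generate_extended_matrix
  exact pv_main n
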